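-- pv_equiv track=rewrite | github.com/nicholast833/PokePricing | scrape/tcgtracking_merge.py | index_products_by_number
-- ===== SOURCE A (Python) =====
-- from typing import Any, Dict, List, Optional, Tuple
--
-- def norm_card_number(num: Any) -> str:
--     if num is None:
--         return ""
--     s = str(num).strip()
--     if "/" in s:
--         s = s.split("/")[0].strip()
--     digits = "".join(ch for ch in s if ch.isdigit())
--     if not digits:
--         return s.lower()
--     try:
--         return str(int(digits))
--     except ValueError:
--         return s.lower()
--
-- def index_products_by_number(products: List[Dict[str, Any]]) -> Dict[str, List[Dict[str, Any]]]:
--     by_num: Dict[str, List[Dict[str, Any]]] = {}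
--     for p in products:
--         num = norm_card_number(p.get("number"))
--         if not num:
--             continue
--         by_num.setdefault(num, []).append(p)
--     return by_num
-- ===== SOURCE B (Python) =====
-- from typing import Any, Dict, List
--
-- def norm_card_number(num: Any) -> str:
--     if num is None:
--         return ""
--     s = str(num).strip()
--     if "/" in s:
--         s = s.split("/")[0].strip()
--     digits = "".join(ch for ch in s if ch.isdigit())
--     if not digits:
--         return s.lower()
--     try:
--         return str(int(digits))
--     except ValueError:
--         return s.lower()
--
-- def index_products_by_number(products: List[Dict[str, Any]]) -> Dict[str, List[Dict[str, Any]]]: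
--     # Key every product once, drop empty keys, then group by repeatedly
--     # partitioning the keyed list on its first key (keeps first-seen key
--     # order and original order inside each group).
--     keyed = [(norm_card_number(p.get("number")), p) for p in products]
--     keyed = [(k, p) for (k, p) in keyed if k]
--     out: Dict[str, List[Dict[str, Any]]] = {}
--     while keyed:
--         k = keyed[0][0]
--         out[k] = [p for (kk, p) in keyed if kk == k]
--         keyed = [(kk, p) for (kk, p) in keyed if kk != k]
--     return out
-- ===== Notes on version B (the rewrite author's own statement) =====
-- stated objective: alternative
-- what changed: Replaces A's single-pass dict setdefault/append accumulation with a key-then-partition strategy: compute each product's key once, drop empty keys, then build each group by taking the first remaining key, collecting all its matches, and recursing on the rest.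
import Mathlib
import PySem

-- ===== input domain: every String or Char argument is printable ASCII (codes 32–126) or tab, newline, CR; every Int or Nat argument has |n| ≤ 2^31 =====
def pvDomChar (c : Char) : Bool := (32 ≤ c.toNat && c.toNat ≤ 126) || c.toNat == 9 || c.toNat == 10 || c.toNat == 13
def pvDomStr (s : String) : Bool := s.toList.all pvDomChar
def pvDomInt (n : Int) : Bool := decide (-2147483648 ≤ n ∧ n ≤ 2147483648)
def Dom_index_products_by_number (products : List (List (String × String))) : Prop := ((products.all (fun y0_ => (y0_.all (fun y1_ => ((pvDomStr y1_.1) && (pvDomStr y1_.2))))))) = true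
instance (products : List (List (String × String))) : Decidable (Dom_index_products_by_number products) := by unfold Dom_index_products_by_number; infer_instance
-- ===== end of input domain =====

-- B groups by repeatedly partitioning a keyed list on its first key instead of
-- A's dict-setdefault accumulation pass; same return value, no speed claim.

-- shared module helper (used verbatim by both A and B, as in the Python module)
def norm_card_number (num : Option String) : String :=
  match num with
  | none => ""
  | some v =>
    let s0 := PySem.Str.strip v
    let s := if PySem.Str.isIn "/" s0
             then PySem.Str.strip (((PySem.Str.split? s0 "/").getD []).headD "")
             else s0
    let digits := String.ofList (s.toList.filter PySem.Chars.isdigit)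
    if digits.toList = [] then PySem.Str.lower s
    else
      match PySem.Int.ofStr? digits with
      | some n => PySem.Int.toStr n
      | none => PySem.Str.lower s

-- ===== PORT A =====
def index_products_by_number (products : List (List (String × String))) : List (String × List (List (String × String))) :=
  (products.foldl
    (fun d p =>
      let num := norm_card_number ((PySem.Dict.mk p).get? "number")
      if num = "" then d
      else d.modify num [] (fun l => l ++ [p]))
    PySem.Dict.empty).items

-- ===== PORT B =====
-- B: take the first key of the keyed list, collect its whole group, recurse on the rest
def pvGroup (keyed : List (String × List (String × String))) : List (String × List (List (String × String))) :=
  match keyed with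
  | [] => []
  | (k, p) :: rest =>
    (k, (((k, p) :: rest).filter (fun e => e.1 == k)).map (·.2)) ::
      pvGroup (rest.filter (fun e => !(e.1 == k)))
termination_by keyed.length
decreasing_by
  simp only [List.length_cons, List.length_unattach]
  exact Nat.lt_succ_of_le (le_trans (List.length_filter_le _ _) (le_of_eq List.length_attach))

def index_products_by_number_alt (products : List (List (String × String))) : List (String × List (List (String × String))) :=
  let keyed := products.map (fun p => (norm_card_number ((PySem.Dict.mk p).get? "number"), p))
  let keyed := keyed.filter (fun e => !(e.1 == ""))
  pvGroup keyed

-- ===== PRECONDITION & SPEC =====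
def Spec_index_products_by_number (products : List (List (String × String))) (out : List (String × List (List (String × String)))) : Prop := out = index_products_by_number_alt products
instance (products : List (List (String × String))) (out : List (String × List (List (String × String)))) : Decidable (Spec_index_products_by_number products out) := by unfold Spec_index_products_by_number; infer_instance

-- ===== CLAIM (what is proved, stated in full; the proofs are below) =====
def Claim_equal_index_products_by_number : Prop := ∀ (products : List (List (String × String))), Dom_index_products_by_number products → Spec_index_products_by_number products (index_products_by_number products)

-- ===== LEMMAS AND PROOFS =====

-- A's loop over products equals the merge loop over the non-empty-keyed pairs
theorem foldA_eq_foldKeyed (products : List (List (String × String)))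
    (d : PySem.Dict String (List (List (String × String)))) :
    products.foldl
      (fun d p =>
        let num := norm_card_number ((PySem.Dict.mk p).get? "number")
        if num = "" then d
        else d.modify num [] (fun l => l ++ [p])) d
    = ((products.map (fun p => (norm_card_number ((PySem.Dict.mk p).get? "number"), p))).filter
        (fun e => !(e.1 == ""))).foldl
        (fun d e => d.modify e.1 [] (fun l => l ++ [e.2])) d := by
  induction products generalizing d with
  | nil => rfl
  | cons p t ih =>
    simp only [List.foldl_cons, List.map_cons, List.filter_cons]
    by_cases h : norm_card_number ((PySem.Dict.mk p).get? "number") = ""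
    · simp [h, ih]
    · simp [h, ih]

-- the setdefault/append merge loop, started from any nodup-keyed dict, produces
-- the old entries extended by their matches followed by pvGroup of the fresh keys
theorem pvGroup_nil : pvGroup [] = [] := by
  rw [pvGroup.eq_def]

theorem pvGroup_cons (k : String) (p : List (String × String)) (rest : List (String × List (String × String))) :
    pvGroup ((k, p) :: rest)
    = (k, (((k, p) :: rest).filter (fun e => e.1 == k)).map (·.2)) ::
        pvGroup (rest.filter (fun e => !(e.1 == k))) := by
  rw [pvGroup.eq_def]

theorem foldKeyed_items (l : List (String × List (String × String)))
    (d : PySem.Dict String (List (List (String × String)))) (h : d.keys.Nodup) :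
    (l.foldl (fun d e => d.modify e.1 [] (fun v => v ++ [e.2])) d).items
    = d.items.map (fun kv => (kv.1, kv.2 ++ ((l.filter (fun e => e.1 == kv.1)).map (·.2))))
      ++ pvGroup (l.filter (fun e => !(d.contains e.1))) := by
  induction l generalizing d with
  | nil =>
    simp [pvGroup_nil]
  | cons e t ih =>
    obtain ⟨k, p⟩ := e
    simp only [List.foldl_cons]
    by_cases hc : d.contains k = true
    · -- key already present: its entry grows, no new group starts here
      have hd' : (d.modify k [] (fun v => v ++ [p])).keys.Nodup := by
        rw [PySem.Dict.keys_modify, PySem.Dict.keys_insert_of_contains _ _ hc]; exact h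
      have hfilter : (t.filter (fun e => !((d.modify k [] (fun v => v ++ [p])).contains e.1)))
          = t.filter (fun e => !(d.contains e.1)) := by
        apply List.filter_congr; intro e _
        rw [PySem.Dict.contains_modify]
        by_cases hx : e.1 = k
        · simp [hx, hc]
        · simp [hx]
      have hmap : (d.modify k [] (fun v => v ++ [p])).items.map
            (fun kv => (kv.1, kv.2 ++ ((t.filter (fun e => e.1 == kv.1)).map (·.2))))
          = d.items.map (fun kv => (kv.1, kv.2 ++ ((((k, p) :: t).filter (fun e => e.1 == kv.1)).map (·.2)))) := by
        unfold PySem.Dict.modify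
        rw [PySem.Dict.items_insert_of_contains _ _ hc, List.map_map]
        apply List.map_congr_left
        rintro ⟨q1, q2⟩ hq
        by_cases hqk : q1 = k
        · subst hqk
          have hv : q2 = d.getD q1 [] := (PySem.Dict.getD_of_mem_items d hq h []).symm
          simp [Function.comp, hv]
        · have h1 : (q1 == k) = false := by simp [hqk]
          have h2 : (k == q1) = false := by simp [Ne.symm hqk]
          simp [Function.comp, h1, h2]
      have hdrop : ((k, p) :: t).filter (fun e => !(d.contains e.1))
          = t.filter (fun e => !(d.contains e.1)) := by
        simp [hc]
      rw [ih _ hd', hfilter, hmap, hdrop]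
    · -- fresh key: entry appended, a new group starts with this pair
      have hcf : d.contains k = false := by simpa using hc
      have hkey : k ∉ d.keys := by
        intro hk; exact hc ((PySem.Dict.contains_iff_mem_keys d k).mpr hk)
      have hd' : (d.modify k [] (fun v => v ++ [p])).keys.Nodup := by
        rw [PySem.Dict.keys_modify, PySem.Dict.keys_insert_of_not_contains _ _ hcf]
        exact List.Nodup.append h (List.nodup_singleton k) (by simpa using hkey)
      have hitems : (d.modify k [] (fun v => v ++ [p])).items = d.items ++ [(k, [] ++ [p])] := by
        unfold PySem.Dict.modify
        rw [PySem.Dict.getD_of_not_contains d [] hcf]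
        exact PySem.Dict.items_insert_of_not_contains _ _ hcf
      -- old entries: the new head pair never matches them
      have hmap : d.items.map (fun kv => (kv.1, kv.2 ++ ((t.filter (fun e => e.1 == kv.1)).map (·.2))))
          = d.items.map (fun kv => (kv.1, kv.2 ++ ((((k, p) :: t).filter (fun e => e.1 == kv.1)).map (·.2)))) := by
        apply List.map_congr_left
        rintro ⟨q1, q2⟩ hq
        have hqk : q1 ≠ k := by
          intro hqk
          exact hkey (hqk ▸ PySem.Dict.mem_keys_of_mem_items d hq)
        have h2 : (k == q1) = false := by simp [Ne.symm hqk]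
        simp [h2]
      -- matches of k survive the ¬contains filter
      have hfk : (t.filter (fun e => !(d.contains e.1))).filter (fun e => e.1 == k)
          = t.filter (fun e => e.1 == k) := by
        rw [List.filter_filter]
        apply List.filter_congr
        intro e _
        by_cases he : e.1 = k
        · simp [he, hcf]
        · simp [he]
      -- remaining fresh pairs: drop key k as well
      have hrest : (t.filter (fun e => !(d.contains e.1))).filter (fun e => !(e.1 == k))
          = t.filter (fun e => !((d.modify k [] (fun v => v ++ [p])).contains e.1)) := by
        rw [List.filter_filter]
        apply List.filter_congr
        intro e _
        rw [PySem.Dict.contains_modify]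
        by_cases he : e.1 = k <;> simp [he]
      have hcons : ((k, p) :: t).filter (fun e => !(d.contains e.1))
          = (k, p) :: t.filter (fun e => !(d.contains e.1)) := by
        simp [hcf]
      have hhead : ((k, p) :: t.filter (fun e => !(d.contains e.1))).filter (fun e => e.1 == k)
          = (k, p) :: (t.filter (fun e => !(d.contains e.1))).filter (fun e => e.1 == k) := by
        simp
      rw [ih _ hd', hitems, List.map_append, hcons, pvGroup_cons, hhead, hfk, hrest, hmap]
      simp

-- ===== VERDICT (by name: the statement is the Claim_ definition above) =====
theorem index_products_by_number_spec : Claim_equal_index_products_by_number := by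
  intro products _
  show index_products_by_number products = index_products_by_number_alt products
  unfold index_products_by_number index_products_by_number_alt
  rw [foldA_eq_foldKeyed,
    foldKeyed_items _ _ (by simp)]
  simp [PySem.Dict.empty]
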